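-- pv_equiv track=rewrite | github.com/faizarali/vigenere-cipher | vigenere.py | modify_key_string
-- ===== SOURCE A (Python) =====
-- def modify_key_string(key_string):
--     key_init_len = len(key_string)
--     key_tracker = 0
--
--     while len(key_string) < 512:
--         key_string += key_string[key_tracker]
--         key_tracker += 1
--
--         if key_tracker >= key_init_len:
--             key_tracker = 0
--
--     return key_string
-- ===== SOURCE B (Python) =====
-- def modify_key_string(key_string):
--     n = len(key_string)
--     if n >= 512:
--         return key_string
--     reps = (512 + n - 1) // n
--     return (key_string * reps)[:512]
-- ===== Notes on version B (the rewrite author's own statement) =====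
-- stated objective: faster
-- what changed: Replaces the 512-iteration append-one-character loop with a closed-form string multiply and slice (key_string * ceil(512/n))[:512], guarded so keys already >= 512 chars are returned unchanged.
import Mathlib
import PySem

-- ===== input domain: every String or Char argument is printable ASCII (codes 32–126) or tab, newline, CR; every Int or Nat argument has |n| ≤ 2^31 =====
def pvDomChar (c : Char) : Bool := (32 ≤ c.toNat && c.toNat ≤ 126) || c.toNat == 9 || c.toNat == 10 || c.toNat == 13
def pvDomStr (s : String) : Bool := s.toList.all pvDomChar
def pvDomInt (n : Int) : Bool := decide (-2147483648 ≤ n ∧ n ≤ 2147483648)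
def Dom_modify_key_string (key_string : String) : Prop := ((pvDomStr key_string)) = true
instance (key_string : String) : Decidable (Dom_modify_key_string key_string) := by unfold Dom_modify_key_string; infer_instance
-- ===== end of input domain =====

-- B replaces A's 512-iteration append-one-character loop by a closed-form
-- string multiply and slice; same return value on every non-empty key.

-- ===== PORT A =====
-- the while loop of A: each iteration appends s[tracker] and cycles tracker
-- (512 fuel always suffices: the length grows by 1 each iteration and the loop
--  stops at 512; the `none` branch is Python's IndexError, reached only for the
--  empty key, which Pre_ excludes)
def pvLoopA (fuel : Nat) (s : List Char) (tracker : Int) (initLen : Int) : Option (List Char) :=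
  match fuel with
  | 0 => some s
  | fuel + 1 =>
    if s.length < 512 then
      match PySem.List.pyGet? s tracker with
      | none => none
      | some c =>
        let t := tracker + 1
        pvLoopA fuel (s ++ [c]) (if t ≥ initLen then 0 else t) initLen
    else some s

def modify_key_string (key_string : String) : String :=
  let s := key_string.toList
  String.ofList ((pvLoopA 512 s 0 (s.length : Int)).getD [])

-- ===== PORT B =====
def modify_key_string_alt (key_string : String) : String :=
  let n : Int := (key_string.toList.length : Int)
  if n ≥ 512 then key_string
  else
    let reps := PySem.Int.floordiv (512 + n - 1) n
    String.ofList ((List.replicate reps.toNat key_string.toList).flatten.take 512)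

-- ===== PRECONDITION & SPEC =====
-- Pre_ excludes only the empty key, on which A raises IndexError (and B ZeroDivisionError).
def Pre_modify_key_string (key_string : String) : Prop := key_string ≠ ""
instance (key_string : String) : Decidable (Pre_modify_key_string key_string) := by unfold Pre_modify_key_string; infer_instance
def pvWitness_modify_key_string : String := "key"

def Spec_modify_key_string (key_string : String) (out : String) : Prop := out = modify_key_string_alt key_string
instance (key_string : String) (out : String) : Decidable (Spec_modify_key_string key_string out) := by unfold Spec_modify_key_string; infer_instance

-- ===== CLAIM (what is proved, stated in full; the proofs are below) =====
def Claim_equal_modify_key_string : Prop := ∀ (key_string : String), Dom_modify_key_string key_string → Pre_modify_key_string key_string → Spec_modify_key_string key_string (modify_key_string key_string)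

-- ===== LEMMAS AND PROOFS =====

-- the cyclic padding of `orig` to length L, the common value of both ports
def pvPad (orig : List Char) (L : Nat) : List Char :=
  (List.range L).map (fun i => orig.getD (i % orig.length) ' ')

theorem pvPad_length (orig : List Char) (L : Nat) : (pvPad orig L).length = L := by
  simp [pvPad]

theorem pvPad_self (orig : List Char) : pvPad orig orig.length = orig := by
  apply List.ext_getElem <;> simp [pvPad]
  intro i hi _
  simp [Nat.mod_eq_of_lt hi, hi]

theorem pvPad_add (orig : List Char) (m : Nat) :
    pvPad orig (orig.length + m) = orig ++ pvPad orig m := by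
  rw [pvPad, List.range_add, List.map_append, List.map_map]
  congr 1
  · exact pvPad_self orig
  · apply List.map_congr_left
    intro i _
    simp [Nat.add_mod_left]

theorem pvPad_succ (orig : List Char) (L : Nat) :
    pvPad orig (L + 1) = pvPad orig L ++ [orig.getD (L % orig.length) ' '] := by
  simp [pvPad, List.range_succ]

theorem pvFlatten_replicate (orig : List Char) (r : Nat) :
    (List.replicate r orig).flatten = pvPad orig (r * orig.length) := by
  induction r with
  | zero => simp [pvPad]
  | succ r ih =>
      rw [List.replicate_succ, List.flatten_cons, ih, Nat.succ_mul, Nat.add_comm,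
        ← pvPad_add]

theorem pvPad_take (orig : List Char) (L m : Nat) (h : m ≤ L) :
    (pvPad orig L).take m = pvPad orig m := by
  simp [pvPad, ← List.map_take, List.take_range, Nat.min_eq_left h]

theorem pvLoopA_eq (orig : List Char) (hn : 0 < orig.length) :
    ∀ (fuel L : Nat), orig.length ≤ L → 512 ≤ fuel + L →
    pvLoopA fuel (pvPad orig L) ((L % orig.length : Nat) : Int) (orig.length : Int)
      = some (pvPad orig (max L 512)) := by
  intro fuel
  induction fuel with
  | zero =>
      intro L _ hfl
      have : max L 512 = L := by omega
      simp [pvLoopA, this]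
  | succ fuel ih =>
      intro L hL hfl
      by_cases h512 : L < 512
      · have hlen : (pvPad orig L).length < 512 := by rw [pvPad_length]; exact h512
        have hmod : L % orig.length < orig.length := Nat.mod_lt _ hn
        have hidx : L % orig.length < (pvPad orig L).length := by
          rw [pvPad_length]; omega
        have hget : PySem.List.pyGet? (pvPad orig L) ((L % orig.length : Nat) : Int)
            = some (orig.getD (L % orig.length) ' ') := by
          rw [PySem.List.pyGet?_natCast, List.getElem?_eq_getElem hidx]
          simp [pvPad]
        have htr : (if ((L % orig.length : Nat) : Int) + 1 ≥ (orig.length : Int)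
              then (0 : Int) else ((L % orig.length : Nat) : Int) + 1)
            = (((L + 1) % orig.length : Nat) : Int) := by
          have h1 : (L + 1) % orig.length = (L % orig.length + 1) % orig.length := by
            rw [Nat.mod_add_mod]
          by_cases hc : L % orig.length + 1 = orig.length
          · have hx : (L + 1) % orig.length = 0 := by rw [h1, hc, Nat.mod_self]
            rw [hx, if_pos (by push_cast; omega)]
            simp
          · have hx : (L + 1) % orig.length = L % orig.length + 1 := by
              rw [h1, Nat.mod_eq_of_lt (by omega)]
            rw [hx, if_neg (by push_cast; omega)]
            push_cast; ring
        rw [pvLoopA, if_pos hlen, hget]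
        dsimp only
        rw [htr, ← pvPad_succ, ih (L + 1) (by omega) (by omega)]
        have hmax : max (L + 1) 512 = max L 512 := by omega
        rw [hmax]
      · have hlen : ¬ (pvPad orig L).length < 512 := by rw [pvPad_length]; omega
        have : max L 512 = L := by omega
        simp [pvLoopA, hlen, this]

theorem modify_key_string_eq (key_string : String) (hpre : key_string ≠ "") :
    modify_key_string key_string = modify_key_string_alt key_string := by
  have hne : key_string.toList ≠ [] := by simpa using hpre
  have hn : 0 < key_string.toList.length := List.length_pos_iff.mpr hne
  have hloop := pvLoopA_eq key_string.toList hn 512 key_string.toList.length le_rfl (by omega)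
  rw [pvPad_self, Nat.mod_self, Nat.cast_zero] at hloop
  have hA : modify_key_string key_string
      = String.ofList (pvPad key_string.toList (max key_string.toList.length 512)) := by
    show String.ofList ((pvLoopA 512 key_string.toList 0
      (key_string.toList.length : Int)).getD []) = _
    rw [hloop, Option.getD_some]
  by_cases hge : (key_string.toList.length : Int) ≥ 512
  · have h512 : 512 ≤ key_string.toList.length := by exact_mod_cast hge
    have hmax : max key_string.toList.length 512 = key_string.toList.length := by omega
    rw [hA, hmax, pvPad_self]
    unfold modify_key_string_alt
    rw [if_pos hge]
    simp
  · have h512 : key_string.toList.length < 512 := by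
      by_contra h
      exact hge (by exact_mod_cast Nat.le_of_not_lt h)
    have hmax : max key_string.toList.length 512 = 512 := by omega
    rw [hA, hmax]
    unfold modify_key_string_alt
    rw [if_neg hge]
    have hcast : (512 + (key_string.toList.length : Int) - 1)
        = ((511 + key_string.toList.length : Nat) : Int) := by push_cast; ring
    rw [hcast, PySem.Int.floordiv_natCast]
    dsimp only
    rw [Int.toNat_natCast, pvFlatten_replicate]
    have hq : 512 ≤ (511 + key_string.toList.length) / key_string.toList.length
        * key_string.toList.length := by
      have h1 := Nat.div_add_mod (511 + key_string.toList.length) key_string.toList.length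
      have h2 := Nat.mod_lt (511 + key_string.toList.length) hn
      have h3 := Nat.mul_comm ((511 + key_string.toList.length) / key_string.toList.length)
        key_string.toList.length
      omega
    rw [pvPad_take _ _ _ hq]

-- ===== VERDICT (by name: the statement is the Claim_ definition above) =====
theorem modify_key_string_spec : Claim_equal_modify_key_string := by
  intro k _ hpre
  exact modify_key_string_eq k hpre
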